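-- pv_equiv track=rewrite | github.com/saurav7007/analysis_multiseq | analysis_multiseq/fasta_utils.py | len_extrema
-- ===== SOURCE A (Python) =====
-- def len_extrema(sequences_lens: dict, extrema: str = "min") -> tuple[int, list[str]]:
--     """
--     Find the sequences with maximum or minimun length.
--
--     Args:
--         seq_lens (dict): {seq_id: len}
--         extreme (str): "min" or "max"
--
--     Returns:
--         tuple: (extreme_len, [seq_ids])
--     """
--     if extrema == "min":
--         extreme_len = min(sequences_lens.values())
--     elif extrema == 'max':
--         extreme_len = max(sequences_lens.values())
--     else:
--         raise ValueError("extrema must be 'min' or 'max'")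
--
--     seq_ids = [seq_id for seq_id, length in sequences_lens.items() if length == extreme_len]
--
--     return (extreme_len, seq_ids)
-- ===== SOURCE B (Python) =====
-- def len_extrema(sequences_lens: dict, extrema: str = "min") -> tuple[int, list[str]]:
--     if extrema not in ("min", "max"):
--         raise ValueError("extrema must be 'min' or 'max'")
--     want_min = extrema == "min"
--     best = None
--     seq_ids = []
--     for seq_id, length in sequences_lens.items():
--         if best is None or (length < best if want_min else length > best):
--             best = length
--             seq_ids = [seq_id]
--         elif length == best:
--             seq_ids.append(seq_id)
--     if best is None:
--         raise ValueError("len_extrema() of empty dict")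
--     return (best, seq_ids)
-- ===== Notes on version B (the rewrite author's own statement) =====
-- stated objective: simpler
-- what changed: Replaces min()/max() over values plus a second filtering pass with one fused loop that keeps a running extreme and resets/extends the id list.
import Mathlib
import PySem

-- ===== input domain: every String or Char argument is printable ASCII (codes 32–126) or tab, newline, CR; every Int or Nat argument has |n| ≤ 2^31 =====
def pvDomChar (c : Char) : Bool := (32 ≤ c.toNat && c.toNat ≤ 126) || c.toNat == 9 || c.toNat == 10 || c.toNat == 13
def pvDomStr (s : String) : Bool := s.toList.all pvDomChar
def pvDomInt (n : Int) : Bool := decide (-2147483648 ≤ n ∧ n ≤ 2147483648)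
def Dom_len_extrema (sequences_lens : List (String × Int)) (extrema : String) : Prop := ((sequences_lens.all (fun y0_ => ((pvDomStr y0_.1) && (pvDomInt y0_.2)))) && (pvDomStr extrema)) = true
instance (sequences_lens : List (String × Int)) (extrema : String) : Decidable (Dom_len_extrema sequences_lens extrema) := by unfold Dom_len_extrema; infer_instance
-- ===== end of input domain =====

-- B fuses A's min()/max() pass and the filtering comprehension into one loop over the items.
-- (Equivalence is about return values; neither version mutates its argument.)

-- ===== PORT A =====
-- min()/max() of the values, then the comprehension keeping ids whose length equals the extreme.
def len_extrema (sequences_lens : List (String × Int)) (extrema : String) : Int × List String :=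
  if extrema = "min" then
    match PySem.List.min? (sequences_lens.map Prod.snd) (fun v => v) with
    | some m => (m, (sequences_lens.filter (fun p => p.2 == m)).map Prod.fst)
    | none => (0, [])      -- min() raises ValueError on an empty dict: outside Pre_
  else if extrema = "max" then
    match PySem.List.max? (sequences_lens.map Prod.snd) (fun v => v) with
    | some m => (m, (sequences_lens.filter (fun p => p.2 == m)).map Prod.fst)
    | none => (0, [])      -- max() raises ValueError on an empty dict: outside Pre_
  else (0, [])             -- raise ValueError("extrema must be 'min' or 'max'"): outside Pre_

-- ===== PORT B =====
-- one fused loop: strictly better length resets the id list, equal length appends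
def lenExtremaLoop (wantMin : Bool) (xs : List (String × Int)) :
    Option Int × List String :=
  xs.foldl (fun st p =>
    match st.1 with
    | none => (some p.2, [p.1])
    | some b =>
        if (if wantMin then p.2 < b else p.2 > b) then (some p.2, [p.1])
        else if p.2 = b then (st.1, st.2 ++ [p.1])
        else st) (none, [])

def len_extrema_alt (sequences_lens : List (String × Int)) (extrema : String) : Int × List String :=
  if extrema = "min" ∨ extrema = "max" then
    match lenExtremaLoop (extrema == "min") sequences_lens with
    | (some b, ids) => (b, ids)
    | (none, _) => (0, [])   -- raise ValueError on an empty dict: outside Pre_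
  else (0, [])               -- raise ValueError: outside Pre_

-- ===== PRECONDITION & SPEC =====
-- Pre_ excludes exactly where A raises ValueError: bad extrema, and the empty dict (min()/max() of empty).
def Pre_len_extrema (sequences_lens : List (String × Int)) (extrema : String) : Prop :=
  sequences_lens ≠ [] ∧ (extrema = "min" ∨ extrema = "max")
instance (sequences_lens : List (String × Int)) (extrema : String) : Decidable (Pre_len_extrema sequences_lens extrema) := by unfold Pre_len_extrema; infer_instance

def pvWitness_len_extrema : (List (String × Int)) × String := ([("a", 3), ("b", 1)], "min")

def Spec_len_extrema (sequences_lens : List (String × Int)) (extrema : String) (out : Int × List String) : Prop := out = len_extrema_alt sequences_lens extrema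
instance (sequences_lens : List (String × Int)) (extrema : String) (out : Int × List String) : Decidable (Spec_len_extrema sequences_lens extrema out) := by unfold Spec_len_extrema; infer_instance

-- ===== CLAIM (what is proved, stated in full; the proofs are below) =====
def Claim_equal_len_extrema : Prop := ∀ (sequences_lens : List (String × Int)) (extrema : String), Dom_len_extrema sequences_lens extrema → Pre_len_extrema sequences_lens extrema → Spec_len_extrema sequences_lens extrema (len_extrema sequences_lens extrema)

-- ===== LEMMAS AND PROOFS =====

-- running extreme of values, seeded with b
def lenBest (wantMin : Bool) (b : Int) (t : List (String × Int)) : Int :=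
  t.foldl (fun a p => if (if wantMin then p.2 < a else p.2 > a) then p.2 else a) b

theorem lenBest_le (wantMin : Bool) (t : List (String × Int)) (b : Int) :
    (if wantMin then lenBest wantMin b t ≤ b else b ≤ lenBest wantMin b t) := by
  induction t generalizing b with
  | nil => cases wantMin <;> simp [lenBest]
  | cons p t ih =>
    have h := ih (if (if wantMin then p.2 < b else p.2 > b) then p.2 else b)
    cases wantMin <;> simp only [lenBest, List.foldl_cons] at h ⊢ <;>
      split_ifs at h ⊢ <;> omega

theorem filterMap_cons (best : Int) (p : String × Int) (t : List (String × Int)) :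
    ((p :: t).filter (fun q => q.2 == best)).map Prod.fst
    = (if best = p.2 then [p.1] else []) ++
        (t.filter (fun q => q.2 == best)).map Prod.fst := by
  rw [List.filter_cons]
  by_cases h : best = p.2
  · rw [if_pos (by simp [h]), if_pos h]; simp
  · rw [if_neg (by simp; exact fun hh => h hh.symm), if_neg h]; simp

theorem lenExtremaLoop_inv (wantMin : Bool) (t : List (String × Int)) (b : Int)
    (ids : List String) :
    t.foldl (fun st p =>
      match st.1 with
      | none => (some p.2, [p.1])
      | some c =>
          if (if wantMin then p.2 < c else p.2 > c) then (some p.2, [p.1])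
          else if p.2 = c then (st.1, st.2 ++ [p.1])
          else st) ((some b : Option Int), ids)
    = (some (lenBest wantMin b t),
       (if lenBest wantMin b t = b then ids else []) ++
         (t.filter (fun p => p.2 == lenBest wantMin b t)).map Prod.fst) := by
  induction t generalizing b ids with
  | nil => simp [lenBest]
  | cons p t ih =>
    simp only [List.foldl_cons]
    by_cases hlt : (if wantMin then p.2 < b else p.2 > b)
    · -- strictly better: reset
      have hb : lenBest wantMin b (p :: t) = lenBest wantMin p.2 t := by
        simp [lenBest, hlt]
      have hne : lenBest wantMin p.2 t ≠ b := by
        have h1 := lenBest_le wantMin t p.2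
        cases wantMin <;> simp at h1 hlt <;> omega
      rw [if_pos hlt, ih p.2 [p.1], hb, if_neg hne, filterMap_cons]
      by_cases h : lenBest wantMin p.2 t = p.2 <;> simp [h]
    · by_cases heq : p.2 = b
      · -- equal length: append the id
        have hb : lenBest wantMin b (p :: t) = lenBest wantMin b t := by
          simp [lenBest, hlt]
        rw [if_neg hlt, if_pos heq, ih b (ids ++ [p.1]), hb, filterMap_cons, heq]
        by_cases h : lenBest wantMin b t = b <;> simp [h]
      · -- strictly worse: skip
        have hb : lenBest wantMin b (p :: t) = lenBest wantMin b t := by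
          simp [lenBest, hlt]
        have hne : lenBest wantMin b t ≠ p.2 := by
          have h1 := lenBest_le wantMin t b
          cases wantMin <;> simp at h1 hlt <;> omega
        rw [if_neg hlt, if_neg heq, ih b ids, hb, filterMap_cons, if_neg hne]
        simp

theorem lenExtremaLoop_spec (wantMin : Bool) (p : String × Int) (t : List (String × Int)) :
    lenExtremaLoop wantMin (p :: t)
    = (some (lenBest wantMin p.2 t),
       ((p :: t).filter (fun q => q.2 == lenBest wantMin p.2 t)).map Prod.fst) := by
  have h := lenExtremaLoop_inv wantMin t p.2 [p.1]
  simp only [lenExtremaLoop, List.foldl_cons] at h ⊢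
  rw [h, filterMap_cons]

theorem lenBest_eq_min (p : String × Int) (t : List (String × Int)) :
    PySem.List.min? ((p :: t).map Prod.snd) (fun v => v)
      = some (lenBest true p.2 t) := by
  rw [List.map_cons, PySem.List.min?_id_cons, List.foldl_map]
  congr 1
  unfold lenBest
  induction t generalizing p with
  | nil => rfl
  | cons q t ih =>
    simp only [List.foldl_cons]
    rw [show min p.2 q.2 = (if q.2 < p.2 then q.2 else p.2) by omega]
    exact ih ⟨q.1, if q.2 < p.2 then q.2 else p.2⟩

theorem lenBest_eq_max (p : String × Int) (t : List (String × Int)) :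
    PySem.List.max? ((p :: t).map Prod.snd) (fun v => v)
      = some (lenBest false p.2 t) := by
  rw [List.map_cons, PySem.List.max?_id_cons, List.foldl_map]
  congr 1
  unfold lenBest
  induction t generalizing p with
  | nil => rfl
  | cons q t ih =>
    simp only [List.foldl_cons]
    rw [show max p.2 q.2 = (if q.2 > p.2 then q.2 else p.2) by omega]
    exact ih ⟨q.1, if q.2 > p.2 then q.2 else p.2⟩

-- ===== VERDICT (by name: the statement is the Claim_ definition above) =====
theorem len_extrema_spec : Claim_equal_len_extrema := by
  intro xs extrema _ hpre
  obtain ⟨hnil, hext⟩ := hpre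
  obtain ⟨p, t, rfl⟩ : ∃ p t, xs = p :: t := by
    cases xs with
    | nil => exact absurd rfl hnil
    | cons p t => exact ⟨p, t, rfl⟩
  unfold Spec_len_extrema len_extrema len_extrema_alt
  rcases hext with h | h <;> subst h
  · rw [if_pos rfl, if_pos (Or.inl rfl),
      show (("min" : String) == "min") = true from by decide,
      lenExtremaLoop_spec true p t, lenBest_eq_min p t]
  · rw [if_neg (show ("max" : String) ≠ "min" from by decide), if_pos rfl,
      if_pos (Or.inr rfl),
      show (("max" : String) == "min") = false from by decide,
      lenExtremaLoop_spec false p t, lenBest_eq_max p t]
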